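-- pv_equiv track=rewrite | github.com/SJ-Leeee/algorithm-archive | 프로그래머스/1/1845. 폰켓몬/폰켓몬.py | solution
-- ===== SOURCE A (Python) =====
-- def solution(nums):
--     diff = 0
--     half = len(nums) // 2
--     pocketmon_dict = {}
--
--     for i in nums:
--         if i not in pocketmon_dict:
--             pocketmon_dict[i] = True
--             diff += 1
--
--     return half if diff >= half else diff
-- ===== SOURCE B (Python) =====
-- def solution(nums):
--     s = sorted(nums)
--     distinct = 0
--     prev = None
--     for x in s:
--         if prev is None or x != prev:
--             distinct += 1
--         prev = x
--     return min(len(nums) // 2, distinct)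
-- ===== Notes on version B (the rewrite author's own statement) =====
-- stated objective: alternative
-- what changed: replaces hash-dict first-occurrence counting with sort-then-adjacent-scan distinct counting and a min() instead of the conditional expression
import Mathlib
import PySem

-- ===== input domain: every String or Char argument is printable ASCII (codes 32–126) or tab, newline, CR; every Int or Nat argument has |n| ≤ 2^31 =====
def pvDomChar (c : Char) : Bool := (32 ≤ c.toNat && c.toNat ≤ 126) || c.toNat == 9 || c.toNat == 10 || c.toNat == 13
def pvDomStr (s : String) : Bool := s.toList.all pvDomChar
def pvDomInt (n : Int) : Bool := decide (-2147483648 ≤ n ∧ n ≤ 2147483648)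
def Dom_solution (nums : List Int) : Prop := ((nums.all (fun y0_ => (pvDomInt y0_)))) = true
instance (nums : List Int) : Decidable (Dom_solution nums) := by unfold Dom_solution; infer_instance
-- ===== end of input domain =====

-- B replaces A's hash-dict first-occurrence counting with a sort-then-adjacent-scan
-- distinct count (alternative algorithm; return value unchanged).


-- ===== PORT A =====
-- the for-loop over nums carrying (pocketmon_dict, diff)
def solutionLoop : List Int → PySem.Dict Int Bool → Int → Int
  | [], _, diff => diff
  | i :: rest, d, diff =>
    if d.contains i = false then solutionLoop rest (d.insert i true) (diff + 1)
    else solutionLoop rest d diff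

def solution (nums : List Int) : Int :=
  let half := PySem.Int.floordiv (nums.length : Int) 2
  let diff := solutionLoop nums PySem.Dict.empty 0
  if diff ≥ half then half else diff

-- ===== PORT B =====
-- the for-loop over the sorted copy carrying (distinct, prev);
-- 'prev is None or x != prev' is exactly 'prev ≠ some x'
def solutionAltLoop : List Int → Int × Option Int → Int × Option Int
  | [], st => st
  | x :: rest, st =>
      solutionAltLoop rest (if st.2 ≠ some x then (st.1 + 1, some x) else (st.1, some x))

def solution_alt (nums : List Int) : Int :=
  let s := PySem.List.sorted nums (fun x => x) false
  let distinct := (solutionAltLoop s (0, none)).1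
  min (PySem.Int.floordiv (nums.length : Int) 2) distinct

-- ===== PRECONDITION & SPEC =====
def Spec_solution (nums : List Int) (out : Int) : Prop := out = solution_alt nums
instance (nums : List Int) (out : Int) : Decidable (Spec_solution nums out) := by unfold Spec_solution; infer_instance

-- ===== CLAIM (what is proved, stated in full; the proofs are below) =====
def Claim_equal_solution : Prop := ∀ (nums : List Int), Dom_solution nums → Spec_solution nums (solution nums)

-- ===== LEMMAS AND PROOFS =====

lemma card_insert_erase (x : Int) (t : Finset Int) :
    (insert x t).card = (t.erase x).card + 1 := by
  have h1 : (insert x t).erase x = t.erase x := by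
    ext a; by_cases hax : a = x <;> simp [Finset.mem_erase, hax]
  have h2 := Finset.card_erase_add_one (s := insert x t) (a := x) (Finset.mem_insert_self x t)
  rw [h1] at h2
  omega

lemma solutionLoop_eq (nums : List Int) :
    ∀ (d : PySem.Dict Int Bool) (diff : Int),
      solutionLoop nums d diff = diff + ((nums.toFinset \ d.keys.toFinset).card : Int) := by
  induction nums with
  | nil => intro d diff; simp [solutionLoop]
  | cons i rest ih =>
    intro d diff
    by_cases h : d.contains i = false
    · have hi : i ∉ d.keys.toFinset := by
        simp only [List.mem_toFinset]
        intro hm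
        have := (PySem.Dict.contains_iff_mem_keys (d := d) (k := i)).mpr hm
        simp [h] at this
      rw [solutionLoop, if_pos h, ih]
      have hkeys : (d.insert i true).keys = d.keys ++ [i] :=
        PySem.Dict.keys_insert_of_not_contains d true h
      have hset : (d.insert i true).keys.toFinset = insert i d.keys.toFinset := by
        rw [hkeys]; simp [List.toFinset_append, Finset.union_comm]
      rw [hset]
      have h1 : rest.toFinset \ insert i d.keys.toFinset
          = (rest.toFinset \ d.keys.toFinset).erase i := by
        ext a; simp [Finset.mem_sdiff, Finset.mem_erase]; tauto
      have h2 : (i :: rest).toFinset \ d.keys.toFinset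
          = insert i (rest.toFinset \ d.keys.toFinset) := by
        simp only [List.toFinset_cons]
        exact Finset.insert_sdiff_of_notMem _ hi
      rw [h1, h2, card_insert_erase]
      push_cast; ring
    · have hi : i ∈ d.keys.toFinset := by
        simp only [List.mem_toFinset]
        exact (PySem.Dict.contains_iff_mem_keys (d := d) (k := i)).mp (by
          cases hc : d.contains i with
          | true => rfl
          | false => exact absurd hc h)
      rw [solutionLoop, if_neg h, ih]
      simp only [List.toFinset_cons, Finset.insert_sdiff_of_mem _ hi]

lemma altLoop_some (s : List Int) :
    ∀ (c p : Int), s.Pairwise (· ≤ ·) → (∀ x ∈ s, p ≤ x) →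
      (solutionAltLoop s (c, some p)).1 = c + ((s.toFinset.erase p).card : Int) := by
  induction s with
  | nil => intro c p _ _; simp [solutionAltLoop]
  | cons x rest ih =>
    intro c p hpw hlb
    have hpw' : rest.Pairwise (· ≤ ·) := hpw.of_cons
    have hx : ∀ y ∈ rest, x ≤ y := by
      intro y hy; exact List.rel_of_pairwise_cons hpw hy
    by_cases hpx : p = x
    · have h1 : solutionAltLoop (x :: rest) (c, some p) = solutionAltLoop rest (c, some x) := by
        simp [solutionAltLoop, hpx]
      rw [h1, ih c x hpw' hx, hpx]
      have hset : ((x :: rest).toFinset).erase x = rest.toFinset.erase x := by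
        simp only [List.toFinset_cons]
        ext a; by_cases hax : a = x <;> simp [Finset.mem_erase, hax]
      rw [hset]
    · have hplt : p < x := lt_of_le_of_ne (hlb x (by simp)) hpx
      have h1 : solutionAltLoop (x :: rest) (c, some p)
           = solutionAltLoop rest (c + 1, some x) := by
        simp only [solutionAltLoop]
        rw [if_pos (by simpa using hpx)]
      rw [h1, ih (c + 1) x hpw' hx]
      have hpnot : p ∉ (x :: rest).toFinset := by
        simp only [List.toFinset_cons, Finset.mem_insert, List.mem_toFinset]
        rintro (rfl | hm)
        · exact hpx rfl
        · exact absurd rfl (ne_of_lt (lt_of_lt_of_le hplt (hx p hm)))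
      rw [Finset.erase_eq_of_notMem hpnot]
      simp only [List.toFinset_cons]
      rw [card_insert_erase]
      push_cast; ring

lemma altLoop_none (s : List Int) (hpw : s.Pairwise (· ≤ ·)) :
    (solutionAltLoop s (0, none)).1 = (s.toFinset.card : Int) := by
  cases s with
  | nil => simp [solutionAltLoop]
  | cons x rest =>
    have h1 : solutionAltLoop (x :: rest) ((0 : Int), none)
        = solutionAltLoop rest (1, some x) := by
      simp [solutionAltLoop]
    rw [h1, altLoop_some rest 1 x hpw.of_cons (fun y hy => List.rel_of_pairwise_cons hpw hy)]
    simp only [List.toFinset_cons]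
    rw [card_insert_erase]
    push_cast; ring

-- ===== VERDICT (by name: the statement is the Claim_ definition above) =====
theorem solution_spec : Claim_equal_solution := by
  intro nums _
  unfold Spec_solution solution solution_alt
  have hA : solutionLoop nums PySem.Dict.empty 0 = (nums.toFinset.card : Int) := by
    rw [solutionLoop_eq]
    simp [PySem.Dict.keys_empty]
  have hperm : (PySem.List.sorted nums (fun x => x) false).Perm nums :=
    PySem.List.sorted_perm nums (fun x => x) false
  have hpw : (PySem.List.sorted nums (fun x => x) false).Pairwise (· ≤ ·) :=
    PySem.List.sorted_pairwise nums (fun x => x)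
  have hB : (solutionAltLoop (PySem.List.sorted nums (fun x => x) false) (0, none)).1
      = (nums.toFinset.card : Int) := by
    rw [altLoop_none _ hpw, List.toFinset_eq_of_perm _ _ hperm]
  simp only [hA, hB]
  rcases le_or_gt (PySem.Int.floordiv (nums.length : Int) 2) (nums.toFinset.card : Int) with h | h
  · rw [if_pos h, min_eq_left h]
  · rw [if_neg (not_le.mpr h), min_eq_right (le_of_lt h)]
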